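-- pv_equiv track=rewrite | github.com/Boondock-Echo/scanner-controller | utilities/tools/build_dependency_graph.py | categorize_imports
-- ===== SOURCE A (Python) =====
-- def categorize_imports(imports, file_to_module):
--     """Categorize imports as local, third-party, or unresolved."""
--     local_imports = set()
--     unresolved_imports = set()
--
--     for imported_module in imports:
--         if imported_module in file_to_module.values():
--             local_imports.add(imported_module)
--         else:
--             unresolved_imports.add(imported_module)
--
--     return local_imports, unresolved_imports
-- ===== SOURCE B (Python) =====
-- def categorize_imports(imports, file_to_module):
--     """Categorize imports as local, third-party, or unresolved."""
--     status = dict.fromkeys(imports, False)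
--     for module in file_to_module.values():
--         if module in status:
--             status[module] = True
--     local_imports = {name for name, is_local in status.items() if is_local}
--     unresolved_imports = {name for name, is_local in status.items() if not is_local}
--     return local_imports, unresolved_imports
-- ===== Notes on version B (the rewrite author's own statement) =====
-- stated objective: faster
-- what changed: Inverts the traversal: instead of testing each import for membership in the module values (a linear scan of the values per import), B builds a status table keyed by the imports once and marks entries during a single scan of the module values, then reads the marked/unmarked keys off the table.
import Mathlib
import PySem

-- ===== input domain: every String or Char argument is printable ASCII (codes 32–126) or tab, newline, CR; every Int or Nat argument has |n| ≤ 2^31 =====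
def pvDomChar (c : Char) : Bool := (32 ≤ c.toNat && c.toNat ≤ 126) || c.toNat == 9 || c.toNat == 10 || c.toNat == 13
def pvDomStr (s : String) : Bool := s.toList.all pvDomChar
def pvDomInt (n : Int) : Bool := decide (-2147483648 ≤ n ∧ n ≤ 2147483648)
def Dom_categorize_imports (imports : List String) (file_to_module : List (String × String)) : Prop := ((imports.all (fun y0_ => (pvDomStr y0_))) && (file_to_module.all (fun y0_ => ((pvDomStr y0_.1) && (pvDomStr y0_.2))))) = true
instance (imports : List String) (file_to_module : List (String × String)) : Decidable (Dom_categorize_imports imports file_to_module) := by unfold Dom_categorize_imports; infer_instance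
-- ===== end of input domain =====

-- B replaces A's per-import membership test against the module values by an inverted marking pass: a status table keyed by the imports is built once and marked while scanning the module values; measurably faster on large inputs (single pass over each collection instead of a values scan per import).


-- ===== PORT A =====
def categorize_imports (imports : List String) (file_to_module : List (String × String)) : List String × List String :=
  imports.foldl
    (fun st imported_module =>
      if (PySem.Dict.values (PySem.Dict.mk file_to_module)).contains imported_module then
        (PySem.Set.add st.1 imported_module, st.2)
      else
        (st.1, PySem.Set.add st.2 imported_module))
    (PySem.Set.empty, PySem.Set.empty)

-- ===== PORT B =====
def categorize_imports_alt (imports : List String) (file_to_module : List (String × String)) : List String × List String :=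
  -- status = dict.fromkeys(imports, False)
  let status0 : PySem.Dict String Bool :=
    imports.foldl (fun d k => PySem.Dict.insert d k false) PySem.Dict.empty
  -- for module in file_to_module.values(): if module in status: status[module] = True
  let status : PySem.Dict String Bool :=
    (PySem.Dict.values (PySem.Dict.mk file_to_module)).foldl
      (fun d m => if PySem.Dict.contains d m then PySem.Dict.insert d m true else d) status0
  -- the two set comprehensions over status.items
  (((PySem.Dict.items status).filter (fun p => p.2)).map (fun p => p.1),
   ((PySem.Dict.items status).filter (fun p => !p.2)).map (fun p => p.1))

-- ===== PRECONDITION & SPEC =====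
def Spec_categorize_imports (imports : List String) (file_to_module : List (String × String)) (out : List String × List String) : Prop := out = categorize_imports_alt imports file_to_module
instance (imports : List String) (file_to_module : List (String × String)) (out : List String × List String) : Decidable (Spec_categorize_imports imports file_to_module out) := by unfold Spec_categorize_imports; infer_instance

-- ===== CLAIM =====
def Claim_equal_categorize_imports : Prop := ∀ (imports : List String) (file_to_module : List (String × String)), Dom_categorize_imports imports file_to_module → Spec_categorize_imports imports file_to_module (categorize_imports imports file_to_module)

-- ===== LEMMAS AND PROOFS =====

-- splitting the paired fold of A into two independent folds
theorem pv_fold_split (p : String → Bool) (l : List String) (a b : List String) :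
    l.foldl
      (fun st m => if p m then (PySem.Set.add st.1 m, st.2) else (st.1, PySem.Set.add st.2 m))
      (a, b)
    = (l.foldl (fun s m => if p m then PySem.Set.add s m else s) a,
       l.foldl (fun s m => if p m then s else PySem.Set.add s m) b) := by
  induction l generalizing a b with
  | nil => rfl
  | cons x xs ih =>
    simp only [List.foldl_cons]
    by_cases h : p x <;> simp [h, ih]

-- a conditional Set.add fold is the filtered unconditional fold
theorem pv_cond_add (p : String → Bool) (l : List String) (a : List String) :
    l.foldl (fun s m => if p m then PySem.Set.add s m else s) (a.filter p)
    = (l.foldl PySem.Set.add a).filter p := by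
  induction l generalizing a with
  | nil => rfl
  | cons x xs ih =>
    simp only [List.foldl_cons]
    have step : (if p x then PySem.Set.add (a.filter p) x else a.filter p)
        = (PySem.Set.add a x).filter p := by
      by_cases hc : x ∈ a <;> by_cases hp : p x <;>
        simp [hc, hp, PySem.Set.add, List.filter_append]
    rw [step, ih]

-- dict.fromkeys(ks, False) is the dedup of ks (a Set.add fold), each key paired with false
theorem pv_fromkeys (ks : List String) (s : List String) :
    ks.foldl (fun d k => PySem.Dict.insert d k false)
        (PySem.Dict.mk (s.map (fun k => (k, false))))
    = PySem.Dict.mk ((ks.foldl PySem.Set.add s).map (fun k => (k, false))) := by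
  induction ks generalizing s with
  | nil => rfl
  | cons x xs ih =>
    simp only [List.foldl_cons]
    have step : PySem.Dict.insert (PySem.Dict.mk (s.map (fun k => (k, false)))) x false
        = PySem.Dict.mk ((PySem.Set.add s x).map (fun k => (k, false))) := by
      by_cases hc : x ∈ s
      · have hcon : PySem.Dict.contains (PySem.Dict.mk (s.map (fun k => (k, false)))) x = true := by
          simpa [PySem.Dict.contains, List.any_map, Function.comp_def] using hc
        simp [PySem.Dict.insert, hcon, PySem.Set.add, hc]
        exact fun a _ h => h.symm
      · have hcon : PySem.Dict.contains (PySem.Dict.mk (s.map (fun k => (k, false)))) x = false := by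
          simp [PySem.Dict.contains, List.any_map, Function.comp_def]
          intro a ha h
          exact hc (h ▸ ha)
        simp [PySem.Dict.insert, hcon, PySem.Set.add, hc]
    rw [step, ih]

-- the marking pass over the module values sets each entry's flag to (old ∨ key ∈ vals), keeping keys and order
theorem pv_mark (vals : List String) (l : List (String × Bool)) :
    (vals.foldl (fun d m => if PySem.Dict.contains d m then PySem.Dict.insert d m true else d)
        (PySem.Dict.mk l)).items
    = l.map (fun p => (p.1, p.2 || vals.contains p.1)) := by
  induction vals generalizing l with
  | nil => simp
  | cons x xs ih =>
    simp only [List.foldl_cons]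
    by_cases hc : PySem.Dict.contains (PySem.Dict.mk l) x = true
    · rw [if_pos hc]
      have hins : PySem.Dict.insert (PySem.Dict.mk l) x true
          = PySem.Dict.mk (l.map (fun p => if p.1 == x then (x, true) else p)) := by
        simp [PySem.Dict.insert, hc]
      rw [hins, ih, List.map_map]
      refine List.map_congr_left (fun p _ => ?_)
      by_cases hp : p.1 = x <;> simp [hp]
    · rw [if_neg hc, ih]
      have hnone : ∀ p ∈ l, ¬ p.1 = x := by
        intro p hp hpx
        apply hc
        simp only [PySem.Dict.contains, List.any_eq_true]
        exact ⟨p, hp, by simp [hpx]⟩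
      refine List.map_congr_left (fun p hp => ?_)
      have hne : p.1 ≠ x := hnone p hp
      simp [hne]

-- ===== VERDICT =====
theorem categorize_imports_spec : Claim_equal_categorize_imports := by
  intro imports file_to_module _
  unfold Spec_categorize_imports categorize_imports
  set vals := PySem.Dict.values (PySem.Dict.mk file_to_module) with hv
  rw [pv_fold_split (fun m => vals.contains m)]
  have hB : categorize_imports_alt imports file_to_module
      = ((imports.foldl PySem.Set.add []).filter (fun k => vals.contains k),
         (imports.foldl PySem.Set.add []).filter (fun k => !vals.contains k)) := by
    simp only [categorize_imports_alt]
    rw [show (PySem.Dict.empty : PySem.Dict String Bool)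
          = PySem.Dict.mk ((([] : List String)).map (fun k => (k, false))) from rfl,
        pv_fromkeys imports [], ← hv, pv_mark]
    simp [List.filter_map, List.map_map, Function.comp_def]
  rw [hB]
  have h1 := pv_cond_add (fun m => vals.contains m) imports []
  have h2 := pv_cond_add (fun m => !vals.contains m) imports []
  simp only [List.filter_nil] at h1 h2
  have hrw : (fun (s : List String) m => if vals.contains m then s else PySem.Set.add s m)
      = (fun s m => if (!vals.contains m) then PySem.Set.add s m else s) := by
    funext s m; cases h : vals.contains m <;> simp
  refine Prod.ext ?_ ?_
  · show imports.foldl (fun s m => if vals.contains m then PySem.Set.add s m else s) PySem.Set.empty = _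
    rw [show (PySem.Set.empty : PySem.Set String) = [] from rfl, h1]
  · show imports.foldl (fun s m => if vals.contains m then s else PySem.Set.add s m) PySem.Set.empty = _
    rw [hrw, show (PySem.Set.empty : PySem.Set String) = [] from rfl, h2]
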